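-- pv_equiv track=rewrite | github.com/ATIX-AG/subscription-manager | src/subscription_manager/cpuinfo.py | find_shared_key_value_pairs
-- ===== SOURCE A (Python) =====
-- import collections
-- from typing import Any, Callable, Dict, Iterable, Iterator, List, Optional, Set, Sequence, Tuple
--
-- def find_shared_key_value_pairs(
--     all_fields: Iterable[str], processors: Sequence[Dict[str, Set]]
-- ) -> Dict[str, Set]:
--     # smashem, last one wins
--     smashed: Dict[str, Set] = collections.defaultdict(set)
--
--     # build a dict of fieldname -> list of all the different values
--     # so we can dump the variant ones.
--     for field in all_fields:
--         for k, v in [(field, processor.get(field)) for processor in processors]: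
--             if v is None:
--                 continue
--             smashed[k].add(v)
--
--     # remove fields that can't be smashed to one value
--     common_cpu_info = dict([(x, smashed[x].pop()) for x in smashed if len(smashed[x]) == 1])
--     return common_cpu_info
-- ===== SOURCE B (Python) =====
-- from typing import Dict, Iterable, Sequence, Set
--
--
-- def find_shared_key_value_pairs(
--     all_fields: Iterable[str], processors: Sequence[Dict[str, Set]]
-- ) -> Dict[str, Set]:
--     # One pass over the processors' own items: remember the first value seen per
--     # field and flag fields that ever show a second distinct value; then keep,
--     # in all_fields order, the flagged-free fields that were seen at all.
--     first: Dict[str, object] = {}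
--     conflicting: Set[str] = set()
--     for processor in processors:
--         for field, value in processor.items():
--             if field not in first:
--                 first[field] = value
--             elif value != first[field]:
--                 conflicting.add(field)
--     result: Dict[str, object] = {}
--     for field in all_fields:
--         if field in result:
--             continue
--         if field in first and field not in conflicting:
--             result[field] = first[field]
--     return result
-- ===== Notes on version B (the rewrite author's own statement) =====
-- stated objective: faster
-- what changed: Instead of building a full set of values per field (fields outer, probing every processor with .get) and then filtering by set size, B makes one pass over the processors' own key/value items keeping only a first-seen value per field plus a conflict flag, and finally selects the unconflicted seen fields in all_fields order.
import Mathlib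
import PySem

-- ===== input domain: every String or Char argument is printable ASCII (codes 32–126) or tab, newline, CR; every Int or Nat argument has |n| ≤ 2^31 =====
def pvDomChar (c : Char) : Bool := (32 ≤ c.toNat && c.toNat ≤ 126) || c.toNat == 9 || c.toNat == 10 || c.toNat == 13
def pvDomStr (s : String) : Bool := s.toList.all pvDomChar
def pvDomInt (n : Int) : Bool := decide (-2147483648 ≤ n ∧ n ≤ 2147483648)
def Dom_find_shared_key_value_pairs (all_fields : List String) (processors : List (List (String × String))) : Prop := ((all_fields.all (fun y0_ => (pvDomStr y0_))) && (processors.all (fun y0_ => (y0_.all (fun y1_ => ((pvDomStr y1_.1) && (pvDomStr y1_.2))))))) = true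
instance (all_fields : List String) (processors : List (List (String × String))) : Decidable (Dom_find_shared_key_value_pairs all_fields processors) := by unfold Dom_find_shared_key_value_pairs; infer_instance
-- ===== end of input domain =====

-- ===== PORT A =====
-- A: for each field, collect the set of values found across processors (defaultdict of set),
-- then keep the fields whose set is a singleton.  .pop() is only reached on a singleton set,
-- where it deterministically returns the unique element (ported as headD).
def find_shared_key_value_pairs (all_fields : List String) (processors : List (List (String × String))) : List (String × String) :=
  let smashed : PySem.Dict String (PySem.Set String) :=
    all_fields.foldl (fun smashed field =>
      (processors.map (fun processor => (field, (PySem.Dict.mk processor).get? field))).foldl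
        (fun smashed kv =>
          match kv.2 with
          | none => smashed
          | some v => smashed.insert kv.1 (PySem.Set.add (smashed.getD kv.1 PySem.Set.empty) v))
        smashed)
      PySem.Dict.empty
  ((smashed.keys.filter (fun x => PySem.Set.len (smashed.getD x PySem.Set.empty) == 1)).map
    (fun x => (x, (smashed.getD x PySem.Set.empty).headD "")))

-- ===== PORT B =====
-- B: one pass over the processors' items keeping first-seen value + conflict flag per field,
-- then select unconflicted seen fields in all_fields order.
def find_shared_key_value_pairs_alt (all_fields : List String) (processors : List (List (String × String))) : List (String × String) :=
  let st : PySem.Dict String String × PySem.Set String :=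
    processors.foldl (fun st processor =>
      processor.foldl (fun (st : PySem.Dict String String × PySem.Set String) fv =>
          match st.1.get? fv.1 with
          | none => (st.1.insert fv.1 fv.2, st.2)
          | some w => if fv.2 ≠ w then (st.1, PySem.Set.add st.2 fv.1) else st)
        st)
      (PySem.Dict.empty, PySem.Set.empty)
  let result : PySem.Dict String String :=
    all_fields.foldl (fun result field =>
      if result.contains field then result
      else match st.1.get? field with
        | some v => if PySem.Set.contains st.2 field then result else result.insert field v
        | none => result)
      PySem.Dict.empty
  result.items

-- ===== PRECONDITION & SPEC =====
-- Pre_ requires each processor association list to have pairwise-distinct keys: that is the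
-- invariant of the Python dicts A is called with (a Python dict cannot carry a duplicate key),
-- so no input on which the Python A returns is excluded.
def Pre_find_shared_key_value_pairs (all_fields : List String) (processors : List (List (String × String))) : Prop :=
  ∀ p ∈ processors, (p.map Prod.fst).Nodup
instance (all_fields : List String) (processors : List (List (String × String))) : Decidable (Pre_find_shared_key_value_pairs all_fields processors) := by unfold Pre_find_shared_key_value_pairs; infer_instance
def pvWitness_find_shared_key_value_pairs : List String × (List (List (String × String))) :=
  (["model", "flags", "bogomips"],
   [[("model", "5"), ("flags", "fpu vme")], [("model", "5"), ("flags", "fpu")]])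
def Spec_find_shared_key_value_pairs (all_fields : List String) (processors : List (List (String × String))) (out : List (String × String)) : Prop := out = find_shared_key_value_pairs_alt all_fields processors
instance (all_fields : List String) (processors : List (List (String × String))) (out : List (String × String)) : Decidable (Spec_find_shared_key_value_pairs all_fields processors out) := by unfold Spec_find_shared_key_value_pairs; infer_instance

-- ===== CLAIM (what is proved, stated in full; the proofs are below) =====
def Claim_equal_find_shared_key_value_pairs : Prop := ∀ (all_fields : List String) (processors : List (List (String × String))), Dom_find_shared_key_value_pairs all_fields processors → Pre_find_shared_key_value_pairs all_fields processors → Spec_find_shared_key_value_pairs all_fields processors (find_shared_key_value_pairs all_fields processors)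

-- ===== LEMMAS AND PROOFS =====

-- Values of field f across the processors, in processor order (processor.get(f)).
def pvVals (ps : List (List (String × String))) (f : String) : List String :=
  ps.filterMap (fun p => (PySem.Dict.mk p).get? f)

-- The shared value of field f, if f is seen and all its values coincide.
def pvGood (ps : List (List (String × String))) (f : String) : Option String :=
  match pvVals ps f with
  | [] => none
  | v :: vs => if vs.all (· == v) then some v else none

def pvH (ps : List (List (String × String))) (f : String) : Option (String × String) :=
  (pvGood ps f).map (fun v => (f, v))

-- Canonical description of the result both programs compute.
def pvCanon (l : List String) (ps : List (List (String × String))) : List (String × String) :=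
  (PySem.List.dedup l).filterMap (pvH ps)

-- ---------- generic list lemmas ----------

theorem pvFilterMapEq {α β : Type} (p : α → Bool) (g : α → β) (h : α → Option β) :
    ∀ l : List α, (∀ x ∈ l, h x = if p x then some (g x) else none) →
      (l.filter p).map g = l.filterMap h := by
  intro l
  induction l with
  | nil => intro _; rfl
  | cons x xs ih =>
    intro H
    have hx := H x (by simp)
    have ht := ih (fun y hy => H y (by simp [hy]))
    by_cases hp : p x = true
    · simp [List.filter_cons, List.filterMap_cons, hp, hx, ht]
    · simp only [Bool.not_eq_true] at hp
      simp [List.filter_cons, List.filterMap_cons, hp, hx, ht]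

theorem pvFilterMapFilter {α β : Type} (p : α → Bool) (h : α → Option β) :
    ∀ l : List α, (∀ x ∈ l, p x = false → h x = none) →
      (l.filter p).filterMap h = l.filterMap h := by
  intro l
  induction l with
  | nil => intro _; rfl
  | cons x xs ih =>
    intro H
    have ht := ih (fun y hy => H y (by simp [hy]))
    by_cases hp : p x = true
    · simp [List.filter_cons, List.filterMap_cons, hp, ht]
    · simp only [Bool.not_eq_true] at hp
      simp [List.filter_cons, List.filterMap_cons, hp, ht, H x (by simp) hp]

theorem pvFilterMap_filter_ne {β : Type} (h : String → Option β) (f0 : String) (hf0 : h f0 = none)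
    (p : String → Bool) :
    ∀ s : List String, ((s.filter (fun y => p y && !(y == f0))).filterMap h = (s.filter p).filterMap h) := by
  intro s
  induction s with
  | nil => rfl
  | cons y ys ih =>
    by_cases hy : y = f0
    · subst hy
      by_cases hp : p y = true
      · simp [List.filter_cons, List.filterMap_cons, hp, hf0, ih]
      · simp only [Bool.not_eq_true] at hp
        simp [List.filter_cons, hp, ih]
    · have hne : (y == f0) = false := by simp [hy]
      by_cases hp : p y = true
      · simp [List.filter_cons, List.filterMap_cons, hne, hp, ih]
      · simp only [Bool.not_eq_true] at hp
        simp [List.filter_cons, hne, hp, ih]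

theorem pvUpdate_of_subset (s : PySem.Set String) (xs : List String) (hsub : ∀ x ∈ xs, x ∈ s) :
    PySem.Set.update s xs = s := by
  rw [PySem.Set.update_eq_append_filter]
  have h2 : (PySem.Set.ofList xs).filter (fun y => !(PySem.Set.contains s y)) = [] := by
    rw [List.filter_eq_nil_iff]
    intro y hy
    have hys : y ∈ s := hsub y (by simpa [PySem.Set.mem_ofList] using hy)
    simp [hys]
  rw [h2, List.append_nil]

theorem pvOfList_filter (p : String → Bool) :
    ∀ l : List String, PySem.Set.ofList (l.filter p) = (PySem.Set.ofList l).filter p := by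
  intro l
  induction l with
  | nil => rfl
  | cons x xs ih =>
    by_cases hp : p x = true
    · rw [List.filter_cons_of_pos hp, PySem.Set.ofList_cons, PySem.Set.ofList_cons, ih,
        List.filter_cons_of_pos hp]
      congr 1
      show PySem.Set.discard (List.filter p (PySem.Set.ofList xs)) x =
        List.filter p (PySem.Set.discard (PySem.Set.ofList xs) x)
      unfold PySem.Set.discard
      rw [List.filter_filter, List.filter_filter]
      exact List.filter_congr (fun y _ => by rw [Bool.and_comm])
    · simp only [Bool.not_eq_true] at hp
      rw [List.filter_cons_of_neg (by simp [hp]), PySem.Set.ofList_cons, ih,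
        List.filter_cons_of_neg (by simp [hp])]
      show List.filter p (PySem.Set.ofList xs) =
        List.filter p (PySem.Set.discard (PySem.Set.ofList xs) x)
      unfold PySem.Set.discard
      rw [List.filter_filter]
      refine (List.filter_congr (fun y _ => ?_)).symm
      by_cases hyx : y = x
      · subst hyx; simp [hp]
      · simp [hyx]

-- ---------- side A ----------

def pvAStep (ps : List (List (String × String))) (d : PySem.Dict String (PySem.Set String))
    (f : String) : PySem.Dict String (PySem.Set String) :=
  ps.foldl (fun d p =>
    match (PySem.Dict.mk p).get? f with
    | none => d
    | some v => d.insert f (PySem.Set.add (d.getD f PySem.Set.empty) v)) d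

theorem pvA_unfold (l : List String) (ps : List (List (String × String))) :
    find_shared_key_value_pairs l ps =
      (let smashed := l.foldl (pvAStep ps) PySem.Dict.empty
       (smashed.keys.filter (fun x => PySem.Set.len (smashed.getD x PySem.Set.empty) == 1)).map
         (fun x => (x, (smashed.getD x PySem.Set.empty).headD ""))) := by
  unfold find_shared_key_value_pairs pvAStep
  simp [List.foldl_map]

theorem pvAStep_getD_self (ps : List (List (String × String))) :
    ∀ (d : PySem.Dict String (PySem.Set String)) (f : String),
      (pvAStep ps d f).getD f PySem.Set.empty =
        PySem.Set.update (d.getD f PySem.Set.empty) (pvVals ps f) := by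
  intro d f
  unfold pvAStep pvVals
  induction ps generalizing d with
  | nil => simp [PySem.Set.update]
  | cons p rest ih =>
    cases hv : (PySem.Dict.mk p).get? f with
    | none => simp only [List.foldl_cons, List.filterMap_cons, hv]; exact ih d
    | some v =>
      simp only [List.foldl_cons, List.filterMap_cons, hv, ih]
      rw [PySem.Set.update_cons, PySem.Dict.getD_insert_self]

theorem pvAStep_getD_ne (ps : List (List (String × String))) :
    ∀ (d : PySem.Dict String (PySem.Set String)) (f g : String), g ≠ f →
      (pvAStep ps d f).getD g PySem.Set.empty = d.getD g PySem.Set.empty := by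
  intro d f g hne
  unfold pvAStep
  induction ps generalizing d with
  | nil => rfl
  | cons p rest ih =>
    cases hv : (PySem.Dict.mk p).get? f with
    | none => simp only [List.foldl_cons, hv]; exact ih d
    | some v =>
      simp only [List.foldl_cons, hv, ih]
      rw [PySem.Dict.getD_insert_of_ne _ _ _ hne]

theorem pvAStep_keys (ps : List (List (String × String))) :
    ∀ (d : PySem.Dict String (PySem.Set String)) (f : String),
      (pvAStep ps d f).keys =
        if pvVals ps f = [] then d.keys else PySem.Set.add d.keys f := by
  intro d f
  unfold pvAStep pvVals
  induction ps generalizing d with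
  | nil => simp
  | cons p rest ih =>
    cases hv : (PySem.Dict.mk p).get? f with
    | none => simp only [List.foldl_cons, List.filterMap_cons, hv]; exact ih d
    | some v =>
      simp only [List.foldl_cons, List.filterMap_cons, hv, ih]
      rw [if_neg (List.cons_ne_nil _ _)]
      have hk : (d.insert f (PySem.Set.add (d.getD f PySem.Set.empty) v)).keys =
          PySem.Set.add d.keys f := by
        by_cases hc : f ∈ d.keys
        · rw [PySem.Dict.keys_insert_of_contains _ _ ((PySem.Dict.contains_iff_mem_keys _ _).mpr hc),
            PySem.Set.add_of_mem hc]
        · rw [PySem.Dict.keys_insert_of_not_contains, PySem.Set.add_of_not_mem hc]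
          exact Bool.eq_false_iff.mpr (fun h => hc ((PySem.Dict.contains_iff_mem_keys _ _).mp h))
      by_cases hrest : (rest.filterMap (fun p => (PySem.Dict.mk p).get? f)) = []
      · rw [if_pos hrest, hk]
      · rw [if_neg hrest, hk]
        exact PySem.Set.add_of_mem ((PySem.Set.mem_add _ _ _).mpr (Or.inr rfl))

theorem pvAFold_getD (ps : List (List (String × String))) :
    ∀ (fields : List String) (d : PySem.Dict String (PySem.Set String)) (f : String),
      (fields.foldl (pvAStep ps) d).getD f PySem.Set.empty =
        if f ∈ fields then PySem.Set.update (d.getD f PySem.Set.empty) (pvVals ps f)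
        else d.getD f PySem.Set.empty := by
  intro fields
  induction fields with
  | nil => intro d f; simp
  | cons f0 fs ih =>
    intro d f
    by_cases hf : f = f0
    · subst hf
      by_cases hmem : f ∈ fs
      · rw [List.foldl_cons, ih, if_pos hmem, if_pos (by simp), pvAStep_getD_self]
        rw [pvUpdate_of_subset]
        intro x hx
        exact (PySem.Set.mem_update _ _ _).mpr (Or.inr hx)
      · rw [List.foldl_cons, ih, if_neg hmem, if_pos (by simp), pvAStep_getD_self]
    · by_cases hmem : f ∈ fs
      · rw [List.foldl_cons, ih, if_pos hmem, if_pos (by simp [hmem]),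
          pvAStep_getD_ne _ _ _ _ hf]
      · rw [List.foldl_cons, ih, if_neg hmem, if_neg (by simp [hf, hmem]),
          pvAStep_getD_ne _ _ _ _ hf]

theorem pvAFold_keys (ps : List (List (String × String))) :
    ∀ (fields : List String) (d : PySem.Dict String (PySem.Set String)),
      (fields.foldl (pvAStep ps) d).keys =
        PySem.Set.update d.keys (fields.filter (fun f => !(pvVals ps f).isEmpty)) := by
  intro fields
  induction fields with
  | nil => intro d; simp [PySem.Set.update]
  | cons f0 fs ih =>
    intro d
    by_cases hv : pvVals ps f0 = []
    · rw [List.foldl_cons, ih, List.filter_cons_of_neg (by simp [hv]), pvAStep_keys, if_pos hv]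
    · rw [List.foldl_cons, ih, List.filter_cons_of_pos (by simp [List.isEmpty_iff, hv]),
        pvAStep_keys, if_neg hv, PySem.Set.update_cons]

theorem pvPointwise (ps : List (List (String × String))) (x : String) :
    pvH ps x =
      if PySem.Set.len (PySem.Set.ofList (pvVals ps x)) == 1 then
        some (x, (PySem.Set.ofList (pvVals ps x)).headD "") else none := by
  unfold pvH pvGood
  cases hv : pvVals ps x with
  | nil => simp [PySem.Set.ofList_nil, PySem.Set.len]
  | cons v vs =>
    rw [PySem.Set.ofList_cons]
    by_cases hall : vs.all (· == v) = true
    · have hd : PySem.Set.discard (PySem.Set.ofList vs) v = [] := by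
        rw [PySem.Set.discard, List.filter_eq_nil_iff]
        intro y hy
        have : y = v := by
          have := List.all_eq_true.mp hall y ((PySem.Set.mem_ofList _ _).mp hy)
          simpa using this
        simp [this]
      simp [hall, hd, PySem.Set.len]
    · have hd : PySem.Set.discard (PySem.Set.ofList vs) v ≠ [] := by
        intro hnil
        apply hall
        rw [List.all_eq_true]
        intro y hy
        by_contra hne
        have hyv : y ≠ v := by simpa using hne
        have : y ∈ PySem.Set.discard (PySem.Set.ofList vs) v :=
          (PySem.Set.mem_discard _ _ _).mpr ⟨(PySem.Set.mem_ofList _ _).mpr hy, hyv⟩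
        simp [hnil] at this
      cases hdd : PySem.Set.discard (PySem.Set.ofList vs) v with
      | nil => exact absurd hdd hd
      | cons y ys =>
        simp only [Bool.not_eq_true] at hall
        simp [hall, hdd, PySem.Set.len]
        omega

theorem pvA_eq_canon (l : List String) (ps : List (List (String × String))) :
    find_shared_key_value_pairs l ps = pvCanon l ps := by
  rw [pvA_unfold]
  simp only []
  rw [pvAFold_keys]
  have hkeys : PySem.Set.update (PySem.Dict.empty : PySem.Dict String (PySem.Set String)).keys
      (l.filter (fun f => !(pvVals ps f).isEmpty)) =
      (PySem.Set.ofList l).filter (fun f => !(pvVals ps f).isEmpty) := by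
    rw [PySem.Dict.keys_empty]
    rw [PySem.Set.update_nil_left]
    exact pvOfList_filter _ l
  rw [hkeys]
  unfold pvCanon
  rw [PySem.List.dedup]
  rw [← pvFilterMapFilter (fun f => !(pvVals ps f).isEmpty) (pvH ps) (PySem.Set.ofList l)
    (by
      intro x _ hpx
      have : pvVals ps x = [] := by simpa [List.isEmpty_iff] using hpx
      simp [pvH, pvGood, this])]
  apply pvFilterMapEq
  intro x hx
  have hxl : x ∈ l := (PySem.Set.mem_ofList _ _).mp (List.mem_of_mem_filter hx)
  have hgd : (l.foldl (pvAStep ps) PySem.Dict.empty).getD x PySem.Set.empty =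
      PySem.Set.ofList (pvVals ps x) := by
    rw [pvAFold_getD, if_pos hxl, PySem.Dict.getD_empty]
    exact PySem.Set.update_nil_left _
  rw [hgd, pvPointwise]

-- ---------- side B ----------

def pvBStep (st : PySem.Dict String String × PySem.Set String) (fv : String × String) :
    PySem.Dict String String × PySem.Set String :=
  match st.1.get? fv.1 with
  | none => (st.1.insert fv.1 fv.2, st.2)
  | some w => if fv.2 ≠ w then (st.1, PySem.Set.add st.2 fv.1) else st

def pvBState (ps : List (List (String × String))) : PySem.Dict String String × PySem.Set String :=
  ps.foldl (fun st p => p.foldl pvBStep st) (PySem.Dict.empty, PySem.Set.empty)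

theorem pvBL1 : ∀ (l : List (String × String)) (st : PySem.Dict String String × PySem.Set String)
    (f : String),
    ((l.foldl pvBStep st).1.get? f) = ((st.1.get? f).or ((PySem.Dict.mk l).get? f)) := by
  intro l
  induction l with
  | nil => intro st f; simp [PySem.Dict.get?]
  | cons kv rest ih =>
    intro st f
    obtain ⟨k, v⟩ := kv
    rw [List.foldl_cons, PySem.Dict.get?_mk_cons]
    cases hk : st.1.get? k with
    | none =>
      have hst : pvBStep st (k, v) = (st.1.insert k v, st.2) := by
        simp only [pvBStep, hk]
      rw [hst, ih]
      by_cases hf : f = k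
      · subst hf
        simp [PySem.Dict.get?_insert_self, hk]
      · have : (k == f) = false := by simp [Ne.symm hf]
        simp [this, PySem.Dict.get?_insert_of_ne _ _ hf]
    | some w =>
      have hst : (pvBStep st (k, v)).1 = st.1 := by
        simp only [pvBStep, hk]
        split <;> rfl
      have hfold : (List.foldl pvBStep (pvBStep st (k, v)) rest).1.get? f =
          ((pvBStep st (k, v)).1.get? f).or ((PySem.Dict.mk rest).get? f) := ih _ f
      rw [hfold, hst]
      by_cases hf : f = k
      · subst hf; simp [hk]
      · have : (k == f) = false := by simp [Ne.symm hf]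
        simp [this]

theorem pvBL2 : ∀ (l : List (String × String)) (st : PySem.Dict String String × PySem.Set String)
    (f : String), (l.map Prod.fst).Nodup →
    (f ∈ (l.foldl pvBStep st).2 ↔
      f ∈ st.2 ∨ ∃ v w, (PySem.Dict.mk l).get? f = some v ∧ st.1.get? f = some w ∧ v ≠ w) := by
  intro l
  induction l with
  | nil =>
    intro st f _
    simp [PySem.Dict.get?]
  | cons kv rest ih =>
    intro st f hnd
    obtain ⟨k, v⟩ := kv
    rw [List.map_cons, List.nodup_cons] at hnd
    obtain ⟨hknotin, hndrest⟩ := hnd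
    rw [List.foldl_cons, PySem.Dict.get?_mk_cons]
    have hrestk : (PySem.Dict.mk rest).get? k = none := by
      rw [PySem.Dict.get?_eq_none_iff_not_mem_keys]
      simpa [PySem.Dict.keys] using hknotin
    cases hk : st.1.get? k with
    | none =>
      have hst : pvBStep st (k, v) = (st.1.insert k v, st.2) := by
        simp only [pvBStep, hk]
      rw [hst, ih _ _ hndrest]
      by_cases hf : f = k
      · subst hf
        simp [hrestk, hk, PySem.Dict.get?_insert_self]
      · have hkf : (k == f) = false := by simp [Ne.symm hf]
        simp only [hkf, Bool.false_eq_true, if_false,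
          PySem.Dict.get?_insert_of_ne _ _ hf]
    | some w =>
      by_cases hvw : v = w
      · have hst : pvBStep st (k, v) = st := by
          simp only [pvBStep, hk]
          simp [hvw]
        rw [hst, ih _ _ hndrest]
        by_cases hf : f = k
        · subst hf
          simp only [hrestk, hk, beq_self_eq_true, if_true, Option.some.injEq]
          constructor
          · rintro (h | ⟨v', w', hv', _⟩)
            · exact Or.inl h
            · simp at hv'
          · rintro (h | ⟨v', w', rfl, rfl, hne⟩)
            · exact Or.inl h
            · exact absurd hvw hne
        · have hkf : (k == f) = false := by simp [Ne.symm hf]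
          simp [hkf]
      · have hst : pvBStep st (k, v) = (st.1, PySem.Set.add st.2 k) := by
          simp only [pvBStep, hk]
          simp [hvw]
        rw [hst, ih _ _ hndrest]
        by_cases hf : f = k
        · subst hf
          simp only [hrestk, hk, beq_self_eq_true, if_true, Option.some.injEq,
            PySem.Set.mem_add]
          constructor
          · rintro (⟨h | h⟩ | ⟨v', w', hv', _⟩)
            · exact Or.inl h
            · exact Or.inr ⟨v, w, rfl, rfl, hvw⟩
            · simp at hv'
          · rintro (h | ⟨v', w', rfl, rfl, hne⟩)
            · exact Or.inl (Or.inl h)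
            · exact Or.inl (Or.inr (by simp))
        · have hkf : (k == f) = false := by simp [Ne.symm hf]
          simp [hkf, PySem.Set.mem_add, hf]

theorem pvB_inv (ps : List (List (String × String)))
    (hnd : ∀ p ∈ ps, (p.map Prod.fst).Nodup) (f : String) :
    (pvBState ps).1.get? f = (pvVals ps f).head? ∧
    (f ∈ (pvBState ps).2 ↔
      ∃ v w, v ∈ pvVals ps f ∧ (pvVals ps f).head? = some w ∧ v ≠ w) := by
  induction ps using List.reverseRecOn with
  | nil =>
    constructor
    · simp [pvBState, pvVals, PySem.Dict.get?, PySem.Dict.empty]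
    · simp [pvBState, pvVals, PySem.Set.empty]
  | append_singleton ps p ih =>
    have hndps : ∀ q ∈ ps, (q.map Prod.fst).Nodup := fun q hq => hnd q (by simp [hq])
    have hndp : (p.map Prod.fst).Nodup := hnd p (by simp)
    obtain ⟨ih1, ih2⟩ := ih hndps
    have hstate2 : pvBState (ps ++ [p]) = p.foldl pvBStep (pvBState ps) := by
      unfold pvBState; rw [List.foldl_append]; rfl
    have hvals : pvVals (ps ++ [p]) f = pvVals ps f ++ ((PySem.Dict.mk p).get? f).toList := by
      unfold pvVals
      rw [List.filterMap_append]
      cases hgp : (PySem.Dict.mk p).get? f <;> simp [List.filterMap_cons, hgp]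
    constructor
    · rw [hstate2, pvBL1, ih1, hvals]
      cases hvp : pvVals ps f with
      | nil => cases ha : (PySem.Dict.mk p).get? f <;> simp
      | cons h t => simp
    · rw [hstate2, pvBL2 _ _ _ hndp, ih1, ih2, hvals]
      cases hvp : pvVals ps f with
      | nil => cases ha : (PySem.Dict.mk p).get? f <;> simp
      | cons h t =>
        simp only [List.cons_append, List.head?_cons, Option.some.injEq]
        constructor
        · rintro (⟨v, w, hv, rfl, hne⟩ | ⟨v, w, hv, rfl, hne⟩)
          · exact ⟨v, h, by rcases List.mem_cons.mp hv with h' | h' <;> simp [h'], rfl, hne⟩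
          · exact ⟨v, h, by simp [hv], rfl, hne⟩
        · rintro ⟨v, w, hv, rfl, hne⟩
          rcases List.mem_cons.mp hv with rfl | hv2
          · exact absurd rfl hne
          · rcases List.mem_append.mp hv2 with hv' | hv'
            · exact Or.inl ⟨v, h, List.mem_cons_of_mem _ hv', rfl, hne⟩
            · right
              cases haa : (PySem.Dict.mk p).get? f with
              | none => rw [haa] at hv'; simp at hv'
              | some v0 =>
                rw [haa] at hv'
                simp only [Option.toList_some, List.mem_singleton] at hv'
                exact ⟨v, h, by simp [haa, hv'], rfl, hne⟩
theorem pvFStep_eq_good (ps : List (List (String × String)))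
    (hnd : ∀ p ∈ ps, (p.map Prod.fst).Nodup) (res : PySem.Dict String String) (f : String) :
    (if res.contains f then res
     else match (pvBState ps).1.get? f with
       | some v => if PySem.Set.contains (pvBState ps).2 f then res else res.insert f v
       | none => res) =
    (if res.contains f then res
     else match pvGood ps f with
       | some v => res.insert f v
       | none => res) := by
  obtain ⟨h1, h2⟩ := pvB_inv ps hnd f
  by_cases hc : res.contains f = true
  · simp [hc]
  · simp only [Bool.not_eq_true] at hc
    rw [h1]
    unfold pvGood
    cases hv : pvVals ps f with
    | nil => simp [hc]
    | cons v vs =>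
      rw [hv] at h2
      by_cases hall : vs.all (· == v) = true
      · have hnotmem : f ∉ (pvBState ps).2 := by
          rw [h2]
          rintro ⟨v', w, hv', hw, hne⟩
          simp only [List.head?_cons, Option.some.injEq] at hw
          subst hw
          rcases List.mem_cons.mp hv' with rfl | hm
          · exact hne rfl
          · exact hne (by simpa using List.all_eq_true.mp hall v' hm)
        have hcont : PySem.Set.contains (pvBState ps).2 f = false :=
          Bool.eq_false_iff.mpr (fun hh => hnotmem ((PySem.Set.contains_iff _ _).mp hh))
        simp [hc, hall, hcont, hnotmem]
      · have hallf : (vs.all (· == v)) = false := Bool.not_eq_true _ ▸ Bool.eq_false_iff.mpr hall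
        have hmem : f ∈ (pvBState ps).2 := by
          rw [h2]
          obtain ⟨y, hy, hyv⟩ := List.all_eq_false.mp hallf
          exact ⟨y, v, List.mem_cons_of_mem _ hy, by simp, by simpa using hyv⟩
        simp [hc, hallf, (PySem.Set.contains_iff _ _).mpr hmem, hmem]

def pvEmit (ps : List (List (String × String))) : List String → List String → List (String × String)
  | [], _ => []
  | f :: fs, seen =>
    if f ∈ seen then pvEmit ps fs seen
    else match pvGood ps f with
      | some v => (f, v) :: pvEmit ps fs (f :: seen)
      | none => pvEmit ps fs seen

theorem pvEmit_congr (ps : List (List (String × String))) :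
    ∀ (fields : List String) (s1 s2 : List String), (∀ x, x ∈ s1 ↔ x ∈ s2) →
      pvEmit ps fields s1 = pvEmit ps fields s2 := by
  intro fields
  induction fields with
  | nil => intro s1 s2 h; rfl
  | cons f fs ih =>
    intro s1 s2 h
    simp only [pvEmit]
    by_cases hf : f ∈ s1
    · rw [if_pos hf, if_pos ((h f).mp hf)]
      exact ih _ _ h
    · rw [if_neg hf, if_neg (fun hx => hf ((h f).mpr hx))]
      cases pvGood ps f with
      | none => exact ih _ _ h
      | some v =>
        rw [ih (f :: s1) (f :: s2) (by intro x; simp [h x])]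

theorem pvBFold_items (ps : List (List (String × String))) :
    ∀ (fields : List String) (res : PySem.Dict String String),
      (fields.foldl (fun res f =>
        if res.contains f then res
        else match pvGood ps f with
          | some v => res.insert f v
          | none => res) res).items = res.items ++ pvEmit ps fields res.keys := by
  intro fields
  induction fields with
  | nil => intro res; simp [pvEmit]
  | cons f0 fs ih =>
    intro res
    rw [List.foldl_cons]
    cases hc : res.contains f0 with
    | true =>
      have hmem : f0 ∈ res.keys := (PySem.Dict.contains_iff_mem_keys _ _).mp hc
      simp only [hc, if_true]
      rw [ih res]
      simp only [pvEmit]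
      rw [if_pos hmem]
    | false =>
      have hnmem : f0 ∉ res.keys :=
        fun hm => by simp [(PySem.Dict.contains_iff_mem_keys _ _).mpr hm] at hc
      simp only [Bool.false_eq_true, if_false]
      cases hg : pvGood ps f0 with
      | none =>
        rw [ih res]
        simp only [pvEmit]
        rw [if_neg hnmem, hg]
      | some v =>
        rw [ih (res.insert f0 v)]
        rw [PySem.Dict.items_insert_of_not_contains _ _ hc,
          PySem.Dict.keys_insert_of_not_contains _ _ hc]
        rw [pvEmit_congr ps fs (res.keys ++ [f0]) (f0 :: res.keys) (by intro x; simp [or_comm])]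
        simp only [pvEmit]
        rw [if_neg hnmem, hg]
        simp [List.append_assoc]

theorem pvEmit_eq (ps : List (List (String × String))) :
    ∀ (fields seen : List String),
      pvEmit ps fields seen =
        ((PySem.Set.ofList fields).filter (fun f => decide (f ∉ seen))).filterMap (pvH ps) := by
  intro fields
  induction fields with
  | nil => intro seen; rfl
  | cons f0 fs ih =>
    intro seen
    rw [PySem.Set.ofList_cons]
    simp only [pvEmit]
    by_cases hf : f0 ∈ seen
    · rw [if_pos hf, ih]
      rw [List.filter_cons_of_neg (by simp [hf])]
      have hfd : List.filter (fun f => decide (f ∉ seen)) (PySem.Set.discard (PySem.Set.ofList fs) f0) =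
          List.filter (fun f => decide (f ∉ seen)) (PySem.Set.ofList fs) := by
        unfold PySem.Set.discard
        rw [List.filter_filter]
        exact List.filter_congr (fun y _ => by
          by_cases h1 : y = f0
          · subst h1; simp [hf]
          · simp [h1])
      rw [hfd]
    · rw [if_neg hf]
      rw [List.filter_cons_of_pos (by simp [hf])]
      rw [List.filterMap_cons]
      cases hg : pvGood ps f0 with
      | none =>
        have hH : pvH ps f0 = none := by simp [pvH, hg]
        simp only [hH]
        rw [ih]
        have hr : List.filterMap (pvH ps)
            (List.filter (fun f => decide (f ∉ seen)) (PySem.Set.discard (PySem.Set.ofList fs) f0)) =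
            List.filterMap (pvH ps) (List.filter (fun f => decide (f ∉ seen)) (PySem.Set.ofList fs)) := by
          unfold PySem.Set.discard
          rw [List.filter_filter]
          exact pvFilterMap_filter_ne (pvH ps) f0 hH _ (PySem.Set.ofList fs)
        exact hr.symm
      | some v =>
        have hH : pvH ps f0 = some (f0, v) := by simp [pvH, hg]
        simp only [hH]
        rw [ih]
        have hfd : List.filter (fun f => decide (f ∉ seen)) (PySem.Set.discard (PySem.Set.ofList fs) f0) =
            List.filter (fun f => decide (f ∉ f0 :: seen)) (PySem.Set.ofList fs) := by
          unfold PySem.Set.discard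
          rw [List.filter_filter]
          exact List.filter_congr (fun y _ => by
            by_cases h1 : y = f0
            · subst h1; simp
            · by_cases h2 : y ∈ seen <;> simp [h1, h2])
        rw [hfd]

theorem pvB_eq_canon (l : List String) (ps : List (List (String × String)))
    (hnd : ∀ p ∈ ps, (p.map Prod.fst).Nodup) :
    find_shared_key_value_pairs_alt l ps = pvCanon l ps := by
  have hstep : find_shared_key_value_pairs_alt l ps =
      (l.foldl (fun res f =>
        if res.contains f then res
        else match (pvBState ps).1.get? f with
          | some v => if PySem.Set.contains (pvBState ps).2 f then res else res.insert f v
          | none => res) PySem.Dict.empty).items := rfl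
  rw [hstep]
  have hfun : (fun (res : PySem.Dict String String) (f : String) =>
      if res.contains f then res
      else match (pvBState ps).1.get? f with
        | some v => if PySem.Set.contains (pvBState ps).2 f then res else res.insert f v
        | none => res) =
      (fun res f =>
        if res.contains f then res
        else match pvGood ps f with
          | some v => res.insert f v
          | none => res) :=
    funext fun res => funext fun f => pvFStep_eq_good ps hnd res f
  rw [hfun, pvBFold_items, pvEmit_eq]
  unfold pvCanon
  rw [PySem.List.dedup]
  simp [PySem.Dict.empty, PySem.Dict.keys]

-- ===== VERDICT (by name: the statement is the Claim_ definition above) =====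
theorem find_shared_key_value_pairs_spec : Claim_equal_find_shared_key_value_pairs := by
  intro l ps _ hpre
  unfold Spec_find_shared_key_value_pairs
  rw [pvA_eq_canon, pvB_eq_canon l ps hpre]
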